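-- pv_equiv track=rewrite | github.com/weigu1/lf_wobbulator | Picopython/pico_epaper_3in7.py | rotate_landscape_2_portrait
-- ===== SOURCE A (Python) =====
-- def rotate_landscape_2_portrait(h, w, buf_landscape, buf_portrait):
--     # Move frame buffer bytes to e-paper buffer to match e-paper
--     # bytes oranisation. That is landscape mode to portrait mode.
--     x=0; y=-1; n=0; m=0
--     #x=0; y=0; n=1; m=0
--     for i in range(0, w//8): # width/8
--         for j in range(0, h): # height
--             m = (n-x)+(n-y)*(w//8-1)
--             buf_portrait[m] = buf_landscape[n]
--             n +=1
--         x = n+i+1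
--         y = n-1
--     return buf_portrait
-- ===== SOURCE B (Python) =====
-- def rotate_landscape_2_portrait(h, w, buf_landscape, buf_portrait):
--     # Same rotation, but each destination byte is computed from a closed-form
--     # source mapping instead of threading the x/y/n/m accumulators.
--     # Mutates buf_portrait in place (its first W*h entries), like the original.
--     W = w // 8
--     if W <= 0 or h <= 0:
--         return buf_portrait
--     size = W * h
--     buf_portrait[:size] = [buf_landscape[(W - 1 - m % W) * h + m // W]
--                            for m in range(size)]
--     return buf_portrait
-- ===== Notes on version B (the rewrite author's own statement) =====
-- stated objective: simpler
-- what changed: The running accumulators x, y, n, m threaded through the nested loops are eliminated: B computes each destination byte directly from a closed-form index map (source (W-1-m%W)*h + m//W for destination index m) and writes the whole rotated block in one pass over the destination indices via a slice assignment.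
import Mathlib
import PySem

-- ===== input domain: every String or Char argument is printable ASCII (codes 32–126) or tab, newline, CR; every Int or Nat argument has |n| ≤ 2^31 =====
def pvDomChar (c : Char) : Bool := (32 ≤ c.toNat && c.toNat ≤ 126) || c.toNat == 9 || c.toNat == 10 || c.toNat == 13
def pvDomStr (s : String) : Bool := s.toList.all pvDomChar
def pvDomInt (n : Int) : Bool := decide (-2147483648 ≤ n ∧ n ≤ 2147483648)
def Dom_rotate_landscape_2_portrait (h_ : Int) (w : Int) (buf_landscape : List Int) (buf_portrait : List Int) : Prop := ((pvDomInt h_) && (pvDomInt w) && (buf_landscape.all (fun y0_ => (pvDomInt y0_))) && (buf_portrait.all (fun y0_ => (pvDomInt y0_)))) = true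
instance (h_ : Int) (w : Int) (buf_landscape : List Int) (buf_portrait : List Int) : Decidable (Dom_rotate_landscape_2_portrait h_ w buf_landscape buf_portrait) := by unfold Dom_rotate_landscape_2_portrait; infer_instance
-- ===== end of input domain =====

-- B eliminates A's running accumulators x/y/n/m in favour of a closed-form index map
-- (objective: simpler). Both Pythons mutate buf_portrait in place (same cells); the
-- equivalence proved here is about the RETURN value.

-- ===== PORT A =====
-- inner loop body of A: state (x, y, n, buf); m is recomputed each iteration
def stepInnerA (W : Int) (bl : List Int) (t : Int × Int × Int × List Int) (_j : Int) : Int × Int × Int × List Int :=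
  match t with
  | (x, y, n, buf) =>
    let m := (n - x) + (n - y) * (W - 1)
    (x, y, n + 1, PySem.List.pySetD buf m (PySem.List.pyGetD bl n 0))

-- outer loop body of A: run the inner loop, then x = n+i+1; y = n-1
def stepOuterA (h_ W : Int) (bl : List Int) (s : Int × Int × Int × List Int) (i : Int) : Int × Int × Int × List Int :=
  match (PySem.List.pyRange 0 h_ 1).foldl (stepInnerA W bl) s with
  | (x, _y, n, buf) => (n + i + 1, n - 1, n, buf)

def rotate_landscape_2_portrait (h_ : Int) (w : Int) (buf_landscape : List Int) (buf_portrait : List Int) : List Int :=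
  let W := PySem.Int.floordiv w 8
  (((PySem.List.pyRange 0 W 1).foldl (stepOuterA h_ W buf_landscape) (0, -1, 0, buf_portrait))).2.2.2

-- ===== PORT B =====
def rotate_landscape_2_portrait_alt (h_ : Int) (w : Int) (buf_landscape : List Int) (buf_portrait : List Int) : List Int :=
  let W := PySem.Int.floordiv w 8
  if W ≤ 0 ∨ h_ ≤ 0 then buf_portrait
  else
    let size := W * h_
    ((PySem.List.pyRange 0 size 1).map (fun m =>
        PySem.List.pyGetD buf_landscape ((W - 1 - PySem.Int.mod m W) * h_ + PySem.Int.floordiv m W) 0))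
      ++ PySem.List.slice buf_portrait (some size) none

-- ===== PRECONDITION & SPEC =====
-- Pre_ excludes exactly the inputs on which A raises IndexError: when the rotated
-- block is non-empty, both buffers must hold at least (w//8)*h entries.
def Pre_rotate_landscape_2_portrait (h_ : Int) (w : Int) (buf_landscape : List Int) (buf_portrait : List Int) : Prop :=
  (0 < PySem.Int.floordiv w 8 ∧ 0 < h_) →
    (PySem.Int.floordiv w 8 * h_ ≤ (buf_landscape.length : Int) ∧
     PySem.Int.floordiv w 8 * h_ ≤ (buf_portrait.length : Int))
instance (h_ : Int) (w : Int) (buf_landscape : List Int) (buf_portrait : List Int) : Decidable (Pre_rotate_landscape_2_portrait h_ w buf_landscape buf_portrait) := by unfold Pre_rotate_landscape_2_portrait; infer_instance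
def pvWitness_rotate_landscape_2_portrait : Int × Int × List Int × List Int := (2, 16, [1, 2, 3, 4], [5, 6, 7, 8])
def Spec_rotate_landscape_2_portrait (h_ : Int) (w : Int) (buf_landscape : List Int) (buf_portrait : List Int) (out : List Int) : Prop := out = rotate_landscape_2_portrait_alt h_ w buf_landscape buf_portrait
instance (h_ : Int) (w : Int) (buf_landscape : List Int) (buf_portrait : List Int) (out : List Int) : Decidable (Spec_rotate_landscape_2_portrait h_ w buf_landscape buf_portrait out) := by unfold Spec_rotate_landscape_2_portrait; infer_instance

-- ===== CLAIM (what is proved, stated in full; the proofs are below) =====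
def Claim_equal_rotate_landscape_2_portrait : Prop := ∀ (h_ : Int) (w : Int) (buf_landscape : List Int) (buf_portrait : List Int), Dom_rotate_landscape_2_portrait h_ w buf_landscape buf_portrait → Pre_rotate_landscape_2_portrait h_ w buf_landscape buf_portrait → Spec_rotate_landscape_2_portrait h_ w buf_landscape buf_portrait (rotate_landscape_2_portrait h_ w buf_landscape buf_portrait)

-- ===== LEMMAS AND PROOFS =====

-- Nat-level model of A's row-i writes: destination (j+1)*Wn-(i+1), source i*Hn+j
def applyRow (Wn Hn : Nat) (bl : List Int) (i k : Nat) (b : List Int) : List Int :=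
  (List.range k).foldl (fun bb j => bb.set ((j + 1) * Wn - (i + 1)) (bl.getD (i * Hn + j) 0)) b

def rowsFold (Wn Hn : Nat) (bl : List Int) (t : Nat) (bp : List Int) : List Int :=
  (List.range t).foldl (fun bb i => applyRow Wn Hn bl i Hn bb) bp

theorem length_applyRow (Wn Hn : Nat) (bl : List Int) (i k : Nat) (b : List Int) :
    (applyRow Wn Hn bl i k b).length = b.length := by
  induction k generalizing b with
  | zero => simp [applyRow]
  | succ k ih => simp [applyRow, List.range_succ, List.foldl_append] at ih ⊢; exact ih b

theorem length_rowsFold (Wn Hn : Nat) (bl : List Int) (t : Nat) (bp : List Int) :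
    (rowsFold Wn Hn bl t bp).length = bp.length := by
  induction t with
  | zero => simp [rowsFold]
  | succ t ih =>
    simp only [rowsFold, List.range_succ, List.foldl_append, List.foldl_cons, List.foldl_nil] at ih ⊢
    rw [length_applyRow, ih]

theorem applyRow_getElem? (Wn Hn : Nat) (bl : List Int) (i k : Nat) (b : List Int)
    (hW : 0 < Wn) (hi : i < Wn) (hk : k ≤ Hn) (hb : Wn * Hn ≤ b.length) (p : Nat) :
    (applyRow Wn Hn bl i k b)[p]? =
      if p % Wn = Wn - 1 - i ∧ p / Wn < k then some (bl.getD (i * Hn + p / Wn) 0) else b[p]? := by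
  induction k with
  | zero => simp [applyRow]
  | succ k ih =>
    have hk' : k ≤ Hn := Nat.le_of_succ_le hk
    have step : applyRow Wn Hn bl i (k + 1) b
        = (applyRow Wn Hn bl i k b).set ((k + 1) * Wn - (i + 1)) (bl.getD (i * Hn + k) 0) := by
      simp [applyRow, List.range_succ, List.foldl_append]
    rw [step, List.getElem?_set, length_applyRow, ih hk']
    have hWk : Wn ≤ (k + 1) * Wn := Nat.le_mul_of_pos_left Wn (Nat.succ_pos k)
    have hqlt : (k + 1) * Wn - (i + 1) < Wn * Hn := by
      have : (k + 1) * Wn ≤ Hn * Wn := Nat.mul_le_mul_right Wn hk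
      have : (k + 1) * Wn ≤ Wn * Hn := by rw [Nat.mul_comm Wn Hn]; exact this
      omega
    by_cases hq : (k + 1) * Wn - (i + 1) = p
    · -- the freshly written cell
      have hp : p = k * Wn + (Wn - 1 - i) := by
        have : (k + 1) * Wn = k * Wn + Wn := by ring
        omega
      have hp' : p = (Wn - 1 - i) + k * Wn := by omega
      have hmod : p % Wn = Wn - 1 - i := by
        rw [hp', Nat.add_mul_mod_self_right]; exact Nat.mod_eq_of_lt (by omega)
      have hdiv : p / Wn = k := by
        rw [hp', Nat.add_mul_div_right _ _ hW, Nat.div_eq_of_lt (by omega)]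
        omega
      rw [if_pos hq, if_pos (by omega), if_pos (⟨hmod, by omega⟩ : _ ∧ _), hdiv]
    · -- an untouched cell: the two conditions agree
      rw [if_neg hq]
      congr 1
      have hdm := Nat.div_add_mod p Wn
      have hexp : (k + 1) * Wn = k * Wn + Wn := by ring
      by_cases hc : p % Wn = Wn - 1 - i ∧ p / Wn < k + 1
      · rcases hc with ⟨h1, h2⟩
        have h2' : p / Wn < k := by
          rcases Nat.lt_succ_iff_lt_or_eq.mp h2 with h | h
          · exact h
          · exfalso
            apply hq
            have : Wn * (p / Wn) = Wn * k := by rw [h]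
            have hmk : Wn * k = k * Wn := Nat.mul_comm _ _
            omega
        simp [h1, h2, h2']
      · have hc' : ¬ (p % Wn = Wn - 1 - i ∧ p / Wn < k) := by
          intro ⟨a1, a2⟩; exact hc ⟨a1, Nat.lt_succ_of_lt a2⟩
        exact propext (iff_of_false hc' hc)

theorem rowsFold_getElem? (Wn Hn : Nat) (bl bp : List Int)
    (hW : 0 < Wn) (hb : Wn * Hn ≤ bp.length) (t : Nat) (ht : t ≤ Wn) (p : Nat) :
    (rowsFold Wn Hn bl t bp)[p]? =
      if Wn - t ≤ p % Wn ∧ p / Wn < Hn then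
        some (bl.getD ((Wn - 1 - p % Wn) * Hn + p / Wn) 0) else bp[p]? := by
  induction t with
  | zero =>
    have : ¬ (Wn - 0 ≤ p % Wn ∧ p / Wn < Hn) := by
      intro ⟨a1, _⟩; exact absurd a1 (by have := Nat.mod_lt p hW; omega)
    simp only [rowsFold, List.range_zero, List.foldl_nil]
    rw [if_neg this]
  | succ t ih =>
    have ht' : t ≤ Wn := Nat.le_of_succ_le ht
    have step : rowsFold Wn Hn bl (t + 1) bp = applyRow Wn Hn bl t Hn (rowsFold Wn Hn bl t bp) := by
      simp [rowsFold, applyRow, List.range_succ, List.foldl_append]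
    rw [step, applyRow_getElem? Wn Hn bl t Hn _ hW (by omega) le_rfl
        (by rw [length_rowsFold]; exact hb), ih ht']
    have hmlt : p % Wn < Wn := Nat.mod_lt p hW
    by_cases h1 : p % Wn = Wn - 1 - t ∧ p / Wn < Hn
    · rcases h1 with ⟨ha, hbb⟩
      have : Wn - 1 - p % Wn = t := by omega
      rw [if_pos ⟨ha, hbb⟩, if_pos (by omega), this]
    · rw [if_neg h1]
      congr 1
      by_cases h2 : Wn - (t + 1) ≤ p % Wn ∧ p / Wn < Hn
      · have h3 : Wn - t ≤ p % Wn := by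
          rcases h2 with ⟨a1, a2⟩
          have : p % Wn ≠ Wn - 1 - t := fun hc => h1 ⟨hc, a2⟩
          omega
        exact propext (iff_of_true ⟨h3, h2.2⟩ h2)
      · have h3 : ¬ (Wn - t ≤ p % Wn ∧ p / Wn < Hn) := by
          intro ⟨a1, a2⟩; exact h2 ⟨by omega, a2⟩
        exact propext (iff_of_false h3 h2)

-- A's inner loop, started from the closed-form state of outer iteration t,
-- performs exactly the row-t writes of applyRow.
theorem innerA_eq (Wn Hn : Nat) (bl : List Int) (t : Nat) (ht : t < Wn) (k : Nat) (b : List Int) :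
    (List.range k).foldl (fun s (j : Nat) => stepInnerA (Wn : Int) bl s (j : Int))
        ((t : Int) * ((Hn : Int) + 1), (t : Int) * (Hn : Int) - 1, (t : Int) * (Hn : Int), b)
      = ((t : Int) * ((Hn : Int) + 1), (t : Int) * (Hn : Int) - 1,
         (t : Int) * (Hn : Int) + (k : Int), applyRow Wn Hn bl t k b) := by
  induction k with
  | zero => simp [applyRow]
  | succ k ih =>
    rw [List.range_succ, List.foldl_append, ih]
    have hWk : Wn ≤ (k + 1) * Wn := Nat.le_mul_of_pos_left Wn (Nat.succ_pos k)
    have hm : ((t : Int) * (Hn : Int) + (k : Int) - (t : Int) * ((Hn : Int) + 1))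
        + ((t : Int) * (Hn : Int) + (k : Int) - ((t : Int) * (Hn : Int) - 1)) * ((Wn : Int) - 1)
        = (((k + 1) * Wn - (t + 1) : Nat) : Int) := by
      rw [Nat.cast_sub (by omega)]
      push_cast
      ring
    have hn : (t : Int) * (Hn : Int) + (k : Int) = ((t * Hn + k : Nat) : Int) := by push_cast; ring
    have hstep : applyRow Wn Hn bl t (k + 1) b
        = (applyRow Wn Hn bl t k b).set ((k + 1) * Wn - (t + 1)) (bl.getD (t * Hn + k) 0) := by
      simp [applyRow, List.range_succ]
    simp only [List.foldl_cons, List.foldl_nil, stepInnerA, hstep]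
    rw [hm, hn, PySem.List.pySetD_natCast, PySem.List.pyGetD_natCast]
    simp only [Prod.mk.injEq, and_true]
    and_intros <;> first | trivial | (push_cast; ring)

-- A's outer loop maintains the closed-form state (t*(H+1), t*H-1, t*H, rowsFold t).
theorem outerA_eq (Wn Hn : Nat) (bl bp : List Int) (hW : 0 < Wn) (t : Nat) (ht : t ≤ Wn) :
    (List.range t).foldl (fun s (i : Nat) => stepOuterA (Hn : Int) (Wn : Int) bl s (i : Int))
        (0, -1, 0, bp)
      = ((t : Int) * ((Hn : Int) + 1), (t : Int) * (Hn : Int) - 1,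
         (t : Int) * (Hn : Int), rowsFold Wn Hn bl t bp) := by
  induction t with
  | zero => simp [rowsFold]
  | succ t ih =>
    have ht' : t ≤ Wn := Nat.le_of_succ_le ht
    rw [List.range_succ, List.foldl_append, ih ht']
    simp only [List.foldl_cons, List.foldl_nil, stepOuterA]
    have hpr : PySem.List.pyRange 0 (Hn : Int) 1 = (List.range Hn).map (fun (j : Nat) => (j : Int)) := by
      rw [PySem.List.pyRange_one]
      simp
    rw [hpr]
    simp only [List.foldl_map]
    rw [innerA_eq Wn Hn bl t (by omega) Hn (rowsFold Wn Hn bl t bp)]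
    have hstep : rowsFold Wn Hn bl (t + 1) bp = applyRow Wn Hn bl t Hn (rowsFold Wn Hn bl t bp) := by
      simp [rowsFold, List.range_succ]
    rw [hstep]
    simp only [Prod.mk.injEq, and_true]
    and_intros <;> first | trivial | (push_cast; ring)

-- buffer component is untouched when the inner range is empty (h ≤ 0)
theorem outerA_empty_inner (h_ W : Int) (bl : List Int) (hh : h_ ≤ 0) :
    ∀ (l : List Int) (s : Int × Int × Int × List Int),
      (l.foldl (stepOuterA h_ W bl) s).2.2.2 = s.2.2.2 := by
  intro l
  induction l with
  | nil => intro s; rfl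
  | cons a l ih =>
    intro s
    rw [List.foldl_cons, ih]
    rcases s with ⟨x, y, n, buf⟩
    simp [stepOuterA, PySem.List.pyRange_one_eq_nil hh]

-- pointwise value of B's rotated block at a destination index p < Wn*Hn
theorem castIdx_eq (Wn Hn p : Nat) (hW : 0 < Wn) :
    ((Wn : Int) - 1 - ((p % Wn : Nat) : Int)) * (Hn : Int) + ((p / Wn : Nat) : Int)
      = (((Wn - 1 - p % Wn) * Hn + p / Wn : Nat) : Int) := by
  have h1 : p % Wn < Wn := Nat.mod_lt p hW
  rw [Nat.cast_add, Nat.cast_mul, Nat.cast_sub (by omega), Nat.cast_sub (by omega), Nat.cast_one]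

-- ===== VERDICT (by name: the statement is the Claim_ definition above) =====
theorem rotate_landscape_2_portrait_spec : Claim_equal_rotate_landscape_2_portrait := by
  intro h_ w bl bp _hdom hpre
  unfold Spec_rotate_landscape_2_portrait
  simp only [rotate_landscape_2_portrait, rotate_landscape_2_portrait_alt]
  by_cases hcase : PySem.Int.floordiv w 8 ≤ 0 ∨ h_ ≤ 0
  · rw [if_pos hcase]
    rcases hcase with hw | hh
    · rw [PySem.List.pyRange_one_eq_nil hw]
      rfl
    · exact outerA_empty_inner h_ _ bl hh _ _
  · rw [if_neg hcase]
    push_neg at hcase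
    obtain ⟨hWpos, hhpos⟩ := hcase
    have hWpos' : (0 : Int) < PySem.Int.floordiv w 8 := by omega
    have hhpos' : (0 : Int) < h_ := by omega
    obtain ⟨hbl, hbp⟩ := hpre ⟨hWpos', hhpos'⟩
    set Wn : Nat := (PySem.Int.floordiv w 8).toNat with hWn_def
    set Hn : Nat := h_.toNat with hHn_def
    have hWeq : PySem.Int.floordiv w 8 = (Wn : Int) := (Int.toNat_of_nonneg (le_of_lt hWpos')).symm
    have hheq : h_ = (Hn : Int) := (Int.toNat_of_nonneg (le_of_lt hhpos')).symm
    have hWn : 0 < Wn := by omega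
    have hHn : 0 < Hn := by omega
    have hsz : PySem.Int.floordiv w 8 * h_ = ((Wn * Hn : Nat) : Int) := by
      rw [hWeq, hheq]; push_cast; ring
    have hbp' : Wn * Hn ≤ bp.length := by
      rw [hsz] at hbp; exact_mod_cast hbp
    have hbl' : Wn * Hn ≤ bl.length := by
      rw [hsz] at hbl; exact_mod_cast hbl
    -- A side: closed-form outer invariant at t = Wn
    have hprW : PySem.List.pyRange 0 (PySem.Int.floordiv w 8) 1
        = (List.range Wn).map (fun (i : Nat) => (i : Int)) := by
      rw [hWeq, PySem.List.pyRange_one]; simp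
    rw [hprW, hWeq, hheq, List.foldl_map]
    rw [outerA_eq Wn Hn bl bp hWn Wn le_rfl]
    -- B side: range over the block size, slice = drop
    have hsz2 : (Wn : Int) * (Hn : Int) = ((Wn * Hn : Nat) : Int) := by push_cast; ring
    rw [hsz2, PySem.List.pyRange_zero_natCast, List.map_map, PySem.List.slice_from_natCast]
    -- pointwise comparison
    apply List.ext_getElem?
    intro p
    rw [rowsFold_getElem? Wn Hn bl bp hWn hbp' Wn le_rfl p, List.getElem?_append]
    simp only [List.length_map, List.length_range]
    by_cases hp : p < Wn * Hn
    · have hdiv : p / Wn < Hn := by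
        rw [Nat.div_lt_iff_lt_mul hWn]; have h := Nat.mul_comm Wn Hn; omega
      rw [if_pos hp, if_pos ⟨by omega, hdiv⟩]
      rw [List.getElem?_map, List.getElem?_range hp]
      simp only [Option.map_some, Function.comp_apply]
      rw [PySem.Int.mod_natCast, PySem.Int.floordiv_natCast, castIdx_eq Wn Hn p hWn,
        PySem.List.pyGetD_natCast]
    · have hdiv : ¬ p / Wn < Hn := by
        have : Hn ≤ p / Wn := (Nat.le_div_iff_mul_le hWn).mpr (by have h := Nat.mul_comm Wn Hn; omega)
        omega
      rw [if_neg hp, if_neg (by intro ⟨_, hc⟩; exact hdiv hc)]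
      rw [List.getElem?_drop, show Wn * Hn + (p - Wn * Hn) = p from by omega]
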